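-- pv_equiv track=rewrite | github.com/Ted-U/Unittest-example | Unittest-example.py | similar_license_plates
-- ===== SOURCE A (Python) =====
-- def similar_license_plates(plate1:str, plate2:str) -> bool:
--   plate1= plate1.replace(" ","")
--   plate2= plate2.replace(" ","")
--   if plate1==plate2:
--     return True
--
--   if plate1 != plate2:
--     for c in ["0", "Q"]:
--       if c in plate2 or c in plate1:
--         plate2 = plate2.replace(c, "O")
--         plate1 = plate1.replace(c, "O")
--     for d in ["1", "T"]:
--       if d in plate2 or d in plate1:
--         plate2 = plate2.replace(d, "I")
--         plate1 = plate1.replace(d, "I")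
--     for e in ["2"]:
--       if e in plate2 or e in plate1:
--         plate2 = plate2.replace(e, "Z")
--         plate1 = plate1.replace(e, "Z")
--     for f in ["5"]:
--       if f in plate2 or f in plate1:
--         plate2 = plate2.replace(f, "S")
--         plate1 = plate1.replace(f, "S")
--     for g in ["8"]:
--       if g in plate2 or g in plate1:
--         plate2 = plate2.replace(g, "B")
--         plate1 = plate1.replace(g, "B")
--
--     if plate1 != plate2:
--       return False
--     else:
--       return True
-- ===== SOURCE B (Python) =====
-- _MAP = {' ': '', '0': 'O', 'Q': 'O', '1': 'I', 'T': 'I', '2': 'Z', '5': 'S', '8': 'B'}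
--
-- def _normalize(plate):
--     return ''.join(_MAP.get(c, c) for c in plate)
--
-- def similar_license_plates(plate1: str, plate2: str) -> bool:
--     return _normalize(plate1) == _normalize(plate2)
-- ===== Notes on version B (the rewrite author's own statement) =====
-- stated objective: simpler
-- what changed: Replaced the ten interleaved whole-string replace scans with guards by a single table-driven pass per string (join of dict-mapped characters) followed by one comparison.
import Mathlib
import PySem

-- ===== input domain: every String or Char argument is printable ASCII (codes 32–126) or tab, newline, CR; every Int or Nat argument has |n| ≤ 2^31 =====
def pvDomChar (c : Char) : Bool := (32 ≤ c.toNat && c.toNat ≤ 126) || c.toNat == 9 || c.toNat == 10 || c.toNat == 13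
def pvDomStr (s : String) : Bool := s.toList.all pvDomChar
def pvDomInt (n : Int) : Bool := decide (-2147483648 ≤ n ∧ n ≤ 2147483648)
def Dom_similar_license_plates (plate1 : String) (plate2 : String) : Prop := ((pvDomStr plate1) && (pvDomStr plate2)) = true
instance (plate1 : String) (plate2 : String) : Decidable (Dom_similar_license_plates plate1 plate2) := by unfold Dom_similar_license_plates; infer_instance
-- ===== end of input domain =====

-- B replaces A's ten guarded whole-string replace scans by one table-driven pass per string
-- (join of dict-mapped characters) followed by a single comparison; objective: simpler.

-- ===== PORT A =====
-- one guarded iteration of one of A's for-loops: replace c by r in both plates if c occurs in either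
def pvStepA (r : String) (st : String × String) (c : String) : String × String :=
  if PySem.Str.isIn c st.2 || PySem.Str.isIn c st.1 then
    (PySem.Str.replace st.1 c r, PySem.Str.replace st.2 c r)
  else st

def similar_license_plates (plate1 : String) (plate2 : String) : Bool :=
  let plate1 := PySem.Str.replace plate1 " " ""
  let plate2 := PySem.Str.replace plate2 " " ""
  if plate1 == plate2 then true
  else
    -- Python's `if plate1 != plate2:` is exactly the negation of the test above
    let st := (plate1, plate2)
    let st := ["0", "Q"].foldl (pvStepA "O") st
    let st := ["1", "T"].foldl (pvStepA "I") st
    let st := ["2"].foldl (pvStepA "Z") st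
    let st := ["5"].foldl (pvStepA "S") st
    let st := ["8"].foldl (pvStepA "B") st
    if st.1 != st.2 then false else true

-- ===== PORT B =====
def pvMap : PySem.Dict Char String :=
  PySem.Dict.ofList [(' ', ""), ('0', "O"), ('Q', "O"), ('1', "I"), ('T', "I"),
                     ('2', "Z"), ('5', "S"), ('8', "B")]

def pvNormalize (p : String) : String :=
  PySem.Str.join "" (p.toList.map (fun c => pvMap.getD c (String.ofList [c])))

def similar_license_plates_alt (plate1 : String) (plate2 : String) : Bool :=
  pvNormalize plate1 == pvNormalize plate2

-- ===== PRECONDITION & SPEC =====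
def Spec_similar_license_plates (plate1 : String) (plate2 : String) (out : Bool) : Prop := out = similar_license_plates_alt plate1 plate2
instance (plate1 : String) (plate2 : String) (out : Bool) : Decidable (Spec_similar_license_plates plate1 plate2 out) := by unfold Spec_similar_license_plates; infer_instance

-- ===== CLAIM (what is proved, stated in full; the proofs are below) =====
def Claim_equal_similar_license_plates : Prop := ∀ (plate1 : String) (plate2 : String), Dom_similar_license_plates plate1 plate2 → Spec_similar_license_plates plate1 plate2 (similar_license_plates plate1 plate2)

-- ===== LEMMAS AND PROOFS =====

-- substitution of one character, and A's space-dropping pass, as list operations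
def pvSub (a b c : Char) : Char := if c = a then b else c
def pvDrop (l : List Char) : List Char := l.flatMap (fun c => if c = ' ' then [] else [c])
def pvNormChar (c : Char) : Char :=
  if c = '0' ∨ c = 'Q' then 'O'
  else if c = '1' ∨ c = 'T' then 'I'
  else if c = '2' then 'Z'
  else if c = '5' then 'S'
  else if c = '8' then 'B'
  else c

lemma pv_go_single (a : Char) (new : List Char) :
    ∀ (fuel : Nat) (l acc : List Char), l.length ≤ fuel →
      PySem.Chars.replace.go [a] new fuel l acc
        = acc.reverse ++ l.flatMap (fun c => if c = a then new else [c]) := by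
  intro fuel
  induction fuel with
  | zero =>
      intro l acc h
      have : l = [] := List.length_eq_zero_iff.mp (Nat.le_zero.mp h)
      subst this
      rw [PySem.Chars.replace.go.eq_def]; simp
  | succ n ih =>
      intro l acc h
      cases l with
      | nil => rw [PySem.Chars.replace.go.eq_def]; simp
      | cons c t =>
          by_cases hc : a = c
          · subst hc
            conv_lhs => rw [PySem.Chars.replace.go.eq_def]
            simp [List.isPrefixOf]
            rw [ih t (new.reverse ++ acc) (by simpa using Nat.le_of_succ_le_succ h)]
            simp
          · conv_lhs => rw [PySem.Chars.replace.go.eq_def]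
            simp [List.isPrefixOf, show (a == c) = false from by simp [hc]]
            rw [ih t (c :: acc) (by simpa using Nat.le_of_succ_le_succ h)]
            simp [show ¬ c = a from fun hh => hc hh.symm]

lemma pv_replace_single (l : List Char) (a : Char) (new : List Char) :
    PySem.Chars.replace l [a] new = l.flatMap (fun c => if c = a then new else [c]) := by
  rw [PySem.Chars.replace]
  simp only [List.isEmpty_cons, if_neg (by simp : ¬false = true)]
  simpa using pv_go_single a new l.length l [] le_rfl

lemma pv_replace_map (l : List Char) (a b : Char) :
    PySem.Chars.replace l [a] [b] = l.map (pvSub a b) := by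
  rw [pv_replace_single]
  induction l with
  | nil => rfl
  | cons c t ih => by_cases h : c = a <;> simp [pvSub, h, ih]

lemma pv_map_id_of_not_mem (l : List Char) (a b : Char) (h : a ∉ l) :
    l.map (pvSub a b) = l := by
  induction l with
  | nil => rfl
  | cons c t ih =>
      simp only [List.mem_cons, not_or] at h
      simp only [List.map_cons, pvSub, if_neg (fun hh : c = a => h.1 hh.symm), ih h.2]

lemma pv_singleton_infix {a : Char} {l : List Char} : [a] <:+: l ↔ a ∈ l := by
  constructor
  · rintro ⟨s, t, rfl⟩; simp
  · intro h
    obtain ⟨s, t, rfl⟩ := List.append_of_mem h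
    exact ⟨s, t, by simp⟩

lemma pv_stepA (aS bS : String) (a b : Char) (ha : aS.toList = [a]) (hb : bS.toList = [b])
    (s1 s2 : String) :
    pvStepA bS (s1, s2) aS
      = (String.ofList (s1.toList.map (pvSub a b)), String.ofList (s2.toList.map (pvSub a b))) := by
  unfold pvStepA
  split
  · refine Prod.ext ?_ ?_ <;>
      (apply String.toList_inj.mp;
       simp [PySem.Str.toList_replace, ha, hb, pv_replace_map])
  · next hguard =>
    rw [Bool.or_eq_true] at hguard
    push_neg at hguard
    have h2 : a ∉ s2.toList := by
      have hf := Bool.eq_false_iff.mpr hguard.1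
      rw [PySem.Str.isIn_eq, ha, PySem.Chars.isIn_eq_false_iff] at hf
      exact fun hm => hf (pv_singleton_infix.mpr hm)
    have h1 : a ∉ s1.toList := by
      have hf := Bool.eq_false_iff.mpr hguard.2
      rw [PySem.Str.isIn_eq, ha, PySem.Chars.isIn_eq_false_iff] at hf
      exact fun hm => hf (pv_singleton_infix.mpr hm)
    rw [pv_map_id_of_not_mem _ _ b h1, pv_map_id_of_not_mem _ _ b h2,
        String.ofList_toList, String.ofList_toList]

lemma pv_comp_norm (c : Char) :
    pvSub '8' 'B' (pvSub '5' 'S' (pvSub '2' 'Z' (pvSub 'T' 'I' (pvSub '1' 'I'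
      (pvSub 'Q' 'O' (pvSub '0' 'O' c)))))) = pvNormChar c := by
  by_cases h0 : c = '0'; · subst h0; decide
  by_cases hQ : c = 'Q'; · subst hQ; decide
  by_cases h1 : c = '1'; · subst h1; decide
  by_cases hT : c = 'T'; · subst hT; decide
  by_cases h2 : c = '2'; · subst h2; decide
  by_cases h5 : c = '5'; · subst h5; decide
  by_cases h8 : c = '8'; · subst h8; decide
  simp [pvSub, pvNormChar, h0, hQ, h1, hT, h2, h5, h8]

lemma pv_chainA (s1 s2 : String) :
    (["8"].foldl (pvStepA "B")
      (["5"].foldl (pvStepA "S")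
        (["2"].foldl (pvStepA "Z")
          (["1", "T"].foldl (pvStepA "I")
            (["0", "Q"].foldl (pvStepA "O") (s1, s2))))))
      = (String.ofList (s1.toList.map pvNormChar), String.ofList (s2.toList.map pvNormChar)) := by
  simp only [List.foldl_cons, List.foldl_nil]
  rw [pv_stepA "0" "O" '0' 'O' rfl rfl,
      pv_stepA "Q" "O" 'Q' 'O' rfl rfl,
      pv_stepA "1" "I" '1' 'I' rfl rfl,
      pv_stepA "T" "I" 'T' 'I' rfl rfl,
      pv_stepA "2" "Z" '2' 'Z' rfl rfl,
      pv_stepA "5" "S" '5' 'S' rfl rfl,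
      pv_stepA "8" "B" '8' 'B' rfl rfl]
  simp only [String.toList_ofList, List.map_map]
  simp only [Prod.mk.injEq, Function.comp_def]
  constructor <;> exact congrArg _ (List.map_congr_left (fun c _ => pv_comp_norm c))

lemma pv_join_nil (ps : List (List Char)) : PySem.Chars.join [] ps = ps.flatten := by
  induction ps with
  | nil => rfl
  | cons a l ih => cases l <;> simp_all [PySem.Chars.join, List.intercalate, List.intersperse]

lemma pv_getD_table (c : Char) :
    (pvMap.getD c (String.ofList [c])).toList = if c = ' ' then [] else [pvNormChar c] := by
  by_cases h0 : c = ' '; · subst h0; decide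
  by_cases h1 : c = '0'; · subst h1; decide
  by_cases h2 : c = 'Q'; · subst h2; decide
  by_cases h3 : c = '1'; · subst h3; decide
  by_cases h4 : c = 'T'; · subst h4; decide
  by_cases h5 : c = '2'; · subst h5; decide
  by_cases h6 : c = '5'; · subst h6; decide
  by_cases h7 : c = '8'; · subst h7; decide
  have hmk : pvMap = PySem.Dict.mk [(' ', ""), ('0', "O"), ('Q', "O"), ('1', "I"), ('T', "I"),
                     ('2', "Z"), ('5', "S"), ('8', "B")] := by decide
  rw [PySem.Dict.getD_eq_get?_getD, hmk, if_neg h0]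
  simp [beq_iff_eq, Ne.symm h0, Ne.symm h1, Ne.symm h2, Ne.symm h3,
        Ne.symm h4, Ne.symm h5, Ne.symm h6, Ne.symm h7, PySem.Dict.get?,
        pvNormChar, h0, h1, h2, h3, h4, h5, h6, h7]

lemma pv_normalize_toList (p : String) :
    (pvNormalize p).toList = (pvDrop p.toList).map pvNormChar := by
  unfold pvNormalize pvDrop
  rw [PySem.Str.toList_join]
  have : ("" : String).toList = [] := rfl
  rw [this, pv_join_nil, List.map_map, ← List.flatMap_def]
  simp only [Function.comp_def, pv_getD_table]
  rw [List.map_flatMap]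
  congr 1
  funext c
  by_cases h : c = ' ' <;> simp [h]

lemma pv_drop_eq (s : String) :
    (PySem.Str.replace s " " "").toList = pvDrop s.toList := by
  rw [PySem.Str.toList_replace]
  have h1 : (" " : String).toList = [' '] := rfl
  have h2 : ("" : String).toList = [] := rfl
  rw [h1, h2, pv_replace_single]; rfl

lemma pv_beq_toList (s t : String) : (s == t) = (s.toList == t.toList) := by
  rcases Bool.eq_false_or_eq_true (s == t) with h | h <;>
    rcases Bool.eq_false_or_eq_true (s.toList == t.toList) with h' | h' <;>
    simp_all [String.toList_inj]

-- ===== VERDICT (by name: the statement is the Claim_ definition above) =====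
theorem similar_license_plates_spec : Claim_equal_similar_license_plates := by
  intro plate1 plate2 _
  unfold Spec_similar_license_plates similar_license_plates similar_license_plates_alt
  simp only []
  rw [pv_beq_toList (pvNormalize plate1), pv_normalize_toList, pv_normalize_toList]
  by_cases heq : PySem.Str.replace plate1 " " "" == PySem.Str.replace plate2 " " ""
  · rw [if_pos heq]
    have : (PySem.Str.replace plate1 " " "").toList = (PySem.Str.replace plate2 " " "").toList := by
      rw [String.toList_inj]; exact beq_iff_eq.mp heq
    rw [pv_drop_eq, pv_drop_eq] at this
    simp [this]
  · rw [if_neg (by simpa using heq)]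
    rw [pv_chainA]
    have e1 := pv_drop_eq plate1
    have e2 := pv_drop_eq plate2
    rw [e1, e2]
    rcases Bool.eq_false_or_eq_true
        ((pvDrop plate1.toList).map pvNormChar == (pvDrop plate2.toList).map pvNormChar) with h | h <;>
      simp_all [bne, String.toList_inj, ← String.toList_inj]
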